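-- pv_equiv track=rewrite | github.com/andpuc23/AdvancedNLP | Task_3/code_/evaluation.py | shrink_predictions
-- ===== SOURCE A (Python) =====
-- def shrink_predictions(word_ids, predictions):
--     ids_and_preds = list(zip(word_ids, predictions))
--     dict_ids_and_preds = {}
--     final_dicts_ids_and_preds = {}
--     for word_id, pred in ids_and_preds:
--         if word_id in dict_ids_and_preds:
--             dict_ids_and_preds[word_id].append(pred)
--         else:
--             dict_ids_and_preds[word_id] = [pred]
--     for word_id, pred_list in dict_ids_and_preds.items():
--         arguments_only_preds = []
--         for element in pred_list:
--             if element != '_':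
--                 arguments_only_preds.append(element)
--             if arguments_only_preds:
--                 most_common = max(arguments_only_preds, key=arguments_only_preds.count)
--                 final_dicts_ids_and_preds[word_id] = most_common
--             else:
--                 final_dicts_ids_and_preds[word_id] = '_'
--     return [dict_ids_and_preds[key][0] for key in sorted(dict_ids_and_preds.keys(), reverse=True)]
-- ===== SOURCE B (Python) =====
-- def shrink_predictions(word_ids, predictions):
--     seen = set()
--     firsts = []
--     for wid, pred in zip(word_ids, predictions):
--         if wid not in seen:
--             seen.add(wid)
--             firsts.append((wid, pred))
--     ordered = sorted(firsts, key=lambda p: p[0], reverse=True)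
--     return [pred for _, pred in ordered]
-- ===== Notes on version B (the rewrite author's own statement) =====
-- stated objective: simpler
-- what changed: B replaces A's group-by dict (key -> list of all preds), dead majority-vote second loop, and sorted-keys-then-dict-lookup with one seen-set pass keeping the first (word_id, pred) pair per word_id, then a single stable sort of those pairs by word_id descending.
import Mathlib
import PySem

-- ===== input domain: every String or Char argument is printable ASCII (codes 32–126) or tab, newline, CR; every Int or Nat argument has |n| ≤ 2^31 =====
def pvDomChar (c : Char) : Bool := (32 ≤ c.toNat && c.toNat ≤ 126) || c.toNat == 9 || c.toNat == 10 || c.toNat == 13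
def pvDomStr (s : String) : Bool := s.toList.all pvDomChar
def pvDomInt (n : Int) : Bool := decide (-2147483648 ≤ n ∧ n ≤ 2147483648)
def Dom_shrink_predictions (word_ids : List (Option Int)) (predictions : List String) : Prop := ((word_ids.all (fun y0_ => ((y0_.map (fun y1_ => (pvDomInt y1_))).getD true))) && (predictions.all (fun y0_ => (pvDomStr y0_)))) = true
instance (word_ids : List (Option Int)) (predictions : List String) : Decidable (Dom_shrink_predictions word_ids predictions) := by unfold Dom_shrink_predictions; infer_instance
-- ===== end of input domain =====

-- B drops A's group-by dict, its dead majority-vote loop and the sorted-keys-then-lookup return: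
-- one seen-set pass keeps the first (word_id, pred) pair per word_id, then those pairs are sorted
-- by word_id descending and the preds returned (objective: simpler).

-- ===== PORT A =====
-- Note on the sort key: Python sorts the Option-typed keys directly and raises TypeError when
-- `none` and `some _` keys are compared (excluded by Pre_); under Pre_ the keys are either all
-- `some` or a single `none`, where sorting by `fun k => k.getD 0` is exact.
-- `.headD ""` / `.getD "_"` only totalize `[0]` / `max(...)` on lists that are provably nonempty there.
def shrink_predictions (word_ids : List (Option Int)) (predictions : List String) : List String :=
  let ids_and_preds := word_ids.zip predictions
  let dict := ids_and_preds.foldl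
    (fun (d : PySem.Dict (Option Int) (List String)) p =>
      if d.contains p.1 then d.modify p.1 [] (fun l => l ++ [p.2]) else d.insert p.1 [p.2])
    PySem.Dict.empty
  -- second loop of A (builds final_dicts_ids_and_preds, never used by the return value)
  let _final := dict.items.foldl
    (fun (fd : PySem.Dict (Option Int) String) kv =>
      (kv.2.foldl
        (fun (st : List String × PySem.Dict (Option Int) String) e =>
          let args := if e ≠ "_" then st.1 ++ [e] else st.1
          if args ≠ [] then
            (args, st.2.insert kv.1 ((PySem.List.max? args (fun el => args.count el)).getD "_"))
          else
            (args, st.2.insert kv.1 "_"))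
        ([], fd)).2)
    PySem.Dict.empty
  (PySem.List.sorted dict.keys (fun k => k.getD 0) true).map (fun k => (dict.getD k []).headD "")

-- ===== PORT B =====
def shrink_predictions_alt (word_ids : List (Option Int)) (predictions : List String) : List String :=
  let st := (word_ids.zip predictions).foldl
    (fun (st : PySem.Set (Option Int) × List (Option Int × String)) p =>
      if PySem.Set.contains st.1 p.1 then st else (PySem.Set.add st.1 p.1, st.2 ++ [p]))
    (PySem.Set.empty, [])
  (PySem.List.sorted st.2 (fun p => p.1.getD 0) true).map (fun p => p.2)

-- ===== PRECONDITION & SPEC =====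
-- Pre_ excludes exactly the inputs where both Pythons raise TypeError: a `None` word_id compared
-- with an int one while sorting (A sorts the distinct keys, B the deduplicated pairs; both compare
-- a None key with an int key iff the zipped word_ids mix None with ints).
def Pre_shrink_predictions (word_ids : List (Option Int)) (predictions : List String) : Prop :=
  ((word_ids.zip predictions).all (fun p => p.1.isSome)) = true ∨
  ((word_ids.zip predictions).all (fun p => p.1.isNone)) = true
instance (word_ids : List (Option Int)) (predictions : List String) : Decidable (Pre_shrink_predictions word_ids predictions) := by unfold Pre_shrink_predictions; infer_instance
def pvWitness_shrink_predictions : List (Option Int) × List String :=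
  ([some 2, some 1, some 2], ["A", "B", "C"])
def Spec_shrink_predictions (word_ids : List (Option Int)) (predictions : List String) (out : List String) : Prop := out = shrink_predictions_alt word_ids predictions
instance (word_ids : List (Option Int)) (predictions : List String) (out : List String) : Decidable (Spec_shrink_predictions word_ids predictions out) := by unfold Spec_shrink_predictions; infer_instance

-- ===== CLAIM (what is proved, stated in full; the proofs are below) =====
def Claim_equal_shrink_predictions : Prop := ∀ (word_ids : List (Option Int)) (predictions : List String), Dom_shrink_predictions word_ids predictions → Pre_shrink_predictions word_ids predictions → Spec_shrink_predictions word_ids predictions (shrink_predictions word_ids predictions)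

-- ===== LEMMAS AND PROOFS =====

-- new keys of `xs` relative to the seen-set `s`, in first-occurrence order
def pvNewKeys (s : PySem.Set (Option Int)) : List (Option Int) → List (Option Int)
  | [] => []
  | k :: t => if PySem.Set.contains s k then pvNewKeys s t else k :: pvNewKeys (PySem.Set.add s k) t

theorem pvAdd_mem (s : PySem.Set (Option Int)) (a : Option Int) (h : a ∈ s) :
    PySem.Set.add s a = s := by
  simp [PySem.Set.add, h]

theorem pvAdd_not_mem (s : PySem.Set (Option Int)) (a : Option Int) (h : a ∉ s) :
    PySem.Set.add s a = s ++ [a] := by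
  simp [PySem.Set.add, h]

theorem pvNewKeys_cons_mem {s : PySem.Set (Option Int)} {a : Option Int} (t : List (Option Int))
    (h : a ∈ s) : pvNewKeys s (a :: t) = pvNewKeys s t := by
  rw [pvNewKeys, if_pos (by simp [h])]

theorem pvNewKeys_cons_not_mem {s : PySem.Set (Option Int)} {a : Option Int} (t : List (Option Int))
    (h : a ∉ s) : pvNewKeys s (a :: t) = a :: pvNewKeys (s ++ [a]) t := by
  rw [pvNewKeys, if_neg (by simp [h]), pvAdd_not_mem s a h]

theorem pvNewKeys_not_mem (t : List (Option Int)) :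
    ∀ (s : PySem.Set (Option Int)) (k : Option Int), k ∈ pvNewKeys s t → k ∉ s := by
  induction t with
  | nil => intro s k h; simp [pvNewKeys] at h
  | cons a t ih =>
    intro s k h
    by_cases hc : a ∈ s
    · rw [pvNewKeys_cons_mem t hc] at h
      exact ih s k h
    · rw [pvNewKeys_cons_not_mem t hc] at h
      rcases List.mem_cons.mp h with rfl | h
      · exact hc
      · intro hks
        exact ih _ k h (List.mem_append_left _ hks)

theorem pvUpdate_eq_append_newKeys (t : List (Option Int)) :
    ∀ (s : PySem.Set (Option Int)), PySem.Set.update s t = s ++ pvNewKeys s t := by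
  induction t with
  | nil => intro s; simp [PySem.Set.update, pvNewKeys]
  | cons a t ih =>
    intro s
    show PySem.Set.update (PySem.Set.add s a) t = s ++ pvNewKeys s (a :: t)
    by_cases hc : a ∈ s
    · rw [pvNewKeys_cons_mem t hc, pvAdd_mem s a hc]; exact ih s
    · rw [pvNewKeys_cons_not_mem t hc, pvAdd_not_mem s a hc, ih (s ++ [a])]
      simp

theorem pvLoop_spec (l : List (Option Int × String)) :
    ∀ (s : PySem.Set (Option Int)) (acc : List (Option Int × String)),
    (l.foldl
      (fun (st : PySem.Set (Option Int) × List (Option Int × String)) p =>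
        if PySem.Set.contains st.1 p.1 then st else (PySem.Set.add st.1 p.1, st.2 ++ [p]))
      (s, acc)).2 =
    acc ++ (pvNewKeys s (l.map Prod.fst)).map
      (fun k => (k, ((l.filter (fun p => p.1 == k)).map Prod.snd).headD "")) := by
  induction l with
  | nil => intro s acc; simp [pvNewKeys]
  | cons p t ih =>
    intro s acc
    by_cases hc : p.1 ∈ s
    · rw [List.foldl_cons, if_pos (by simp [hc]), ih s acc,
        List.map_cons, pvNewKeys_cons_mem _ hc]
      congr 1
      apply List.map_congr_left
      intro k hk
      have hk2 : k ∉ s := pvNewKeys_not_mem _ s k hk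
      have hne : (p.1 == k) = false := by
        by_contra h
        have hpk : p.1 = k := eq_of_beq (by revert h; cases p.1 == k <;> simp)
        exact hk2 (hpk ▸ hc)
      rw [List.filter_cons, hne]
      simp
    · rw [List.foldl_cons, if_neg (by simp [hc]),
        pvAdd_not_mem s p.1 hc, ih (s ++ [p.1]) (acc ++ [p]),
        List.map_cons, pvNewKeys_cons_not_mem _ hc, List.map_cons, List.append_assoc]
      congr 1
      rw [List.singleton_append]
      congr 1
      · rw [List.filter_cons, show (p.1 == p.1) = true from by simp]
        simp
      · apply List.map_congr_left
        intro k hk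
        have hk2 : k ∉ s ++ [p.1] := pvNewKeys_not_mem _ _ k hk
        have hne : (p.1 == k) = false := by
          by_contra h
          have hpk : p.1 = k := eq_of_beq (by revert h; cases p.1 == k <;> simp)
          exact hk2 (hpk ▸ List.mem_append_right _ (List.mem_singleton.mpr rfl))
        rw [List.filter_cons, hne]
        simp

theorem pvInsertBy_map {α β : Type} (f : α → β) (bef : β → β → Bool) (bef' : α → α → Bool)
    (h : ∀ a b, bef (f a) (f b) = bef' a b) (x : α) (ys : List α) :
    PySem.List.insertBy bef (f x) (ys.map f) = (PySem.List.insertBy bef' x ys).map f := by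
  induction ys with
  | nil => simp [PySem.List.insertBy]
  | cons y ys ih =>
    simp only [List.map_cons, PySem.List.insertBy, h]
    by_cases hb : bef' x y = true
    · simp [hb]
    · simp [hb, ih]

theorem pvSorted_map {α β : Type} (xs : List α) (f : α → β) (key : β → Int) :
    PySem.List.sorted (xs.map f) key true = (PySem.List.sorted xs (fun x => key (f x)) true).map f := by
  rw [PySem.List.sorted_rev_eq_foldl_insertBy, PySem.List.sorted_rev_eq_foldl_insertBy]
  suffices h : ∀ (acc : List α),
      (xs.map f).foldl (fun acc x => PySem.List.insertBy (fun a b => decide (key b < key a)) x acc) (acc.map f)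
      = (xs.foldl (fun acc x => PySem.List.insertBy (fun a b => decide (key (f b) < key (f a))) x acc) acc).map f by
    simpa using h []
  induction xs with
  | nil => intro acc; simp
  | cons x xs ih =>
    intro acc
    simp only [List.map_cons, List.foldl_cons]
    rw [pvInsertBy_map f _ (fun a b => decide (key (f b) < key (f a))) (fun a b => rfl) x acc]
    exact ih _

-- the A-side dict fold is the unconditional modify fold
theorem pvDictFold_eq_modify (l : List (Option Int × String)) :
    l.foldl
      (fun (d : PySem.Dict (Option Int) (List String)) p =>
        if d.contains p.1 then d.modify p.1 [] (fun v => v ++ [p.2]) else d.insert p.1 [p.2])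
      PySem.Dict.empty =
    l.foldl (fun d p => d.modify p.1 [] (fun v => v ++ [p.2])) PySem.Dict.empty := by
  apply PySem.List.foldl_congr_mem
  intro d p _
  by_cases hc : d.contains p.1 = true
  · simp [hc]
  · have hcf : d.contains p.1 = false := by simpa using hc
    have h0 : d.getD p.1 [] = [] := PySem.Dict.getD_of_not_contains d [] hcf
    simp [hc, PySem.Dict.modify, h0]

-- ===== VERDICT (by name: the statement is the Claim_ definition above) =====
theorem shrink_predictions_spec : Claim_equal_shrink_predictions := by
  intro word_ids predictions _ _
  unfold Spec_shrink_predictions shrink_predictions shrink_predictions_alt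
  simp only []
  set pairs := word_ids.zip predictions with hpairs
  rw [pvDictFold_eq_modify]
  set d := pairs.foldl (fun d p => d.modify p.1 [] (fun v => v ++ [p.2])) PySem.Dict.empty with hd
  have hkeys : d.keys = pvNewKeys PySem.Set.empty (pairs.map Prod.fst) := by
    rw [hd]
    rw [PySem.Dict.keys_foldl_modify_key pairs Prod.fst [] (fun _ p => fun v => v ++ [p.2]) PySem.Dict.empty]
    rw [show (PySem.Dict.empty : PySem.Dict (Option Int) (List String)).keys = ([] : List (Option Int)) from rfl]
    rw [pvUpdate_eq_append_newKeys]
    simp [PySem.Set.empty]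
  have hgetD : ∀ k, d.getD k [] = (pairs.filter (fun p => p.1 == k)).map Prod.snd := by
    intro k
    rw [hd, PySem.Dict.getD_foldl_modify_append]
    simp [PySem.Dict.getD_empty]
  have hB := pvLoop_spec pairs PySem.Set.empty []
  rw [hB]
  simp only [List.nil_append]
  rw [pvSorted_map (pvNewKeys PySem.Set.empty (pairs.map Prod.fst))
        (fun k => (k, ((pairs.filter (fun p => p.1 == k)).map Prod.snd).headD ""))
        (fun p => p.1.getD 0)]
  rw [List.map_map, hkeys]
  apply List.map_congr_left
  intro k _
  rw [hgetD k]
  rfl
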